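-- pv_equiv track=rewrite | github.com/HugoMFFernandes/Exerc-cios_Pc_1 | Python/Exames/Exame_2023_B.py | vetor_fibonacci
-- ===== SOURCE A (Python) =====
-- def vetor_fibonacci(k):
--     if k<3:
--         return False
--
--     if k>=3:
--         X=[3]
--         sequencia=[1,2,3]
--         while len(sequencia)<k:
--             sequencia.append(sequencia[len(sequencia)-2]+sequencia[len(sequencia)-1])
--
--         for i in range(3,len(sequencia)):
--             if sequencia[i]%3==0:
--                 X.append(sequencia[i])
--
--     return X
-- ===== SOURCE B (Python) =====
-- def vetor_fibonacci(k):
--     if k < 3: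
--         return False
--     X = [3]
--     prev2, prev1 = 2, 3
--     for _ in range(3, k):
--         nxt = prev2 + prev1
--         if nxt % 3 == 0:
--             X.append(nxt)
--         prev2, prev1 = prev1, nxt
--     return X
-- ===== Notes on version B (the rewrite author's own statement) =====
-- stated objective: simpler
-- what changed: B generates and filters in one pass keeping only two rolling integers (prev2, prev1) instead of building the whole length-k sequence list and then scanning it by index in a second loop.
-- outside the precondition, e.g. on vetor_fibonacci(2): A returns False, B returns False; on vetor_fibonacci(0): A returns False, B returns False
import Mathlib
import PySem

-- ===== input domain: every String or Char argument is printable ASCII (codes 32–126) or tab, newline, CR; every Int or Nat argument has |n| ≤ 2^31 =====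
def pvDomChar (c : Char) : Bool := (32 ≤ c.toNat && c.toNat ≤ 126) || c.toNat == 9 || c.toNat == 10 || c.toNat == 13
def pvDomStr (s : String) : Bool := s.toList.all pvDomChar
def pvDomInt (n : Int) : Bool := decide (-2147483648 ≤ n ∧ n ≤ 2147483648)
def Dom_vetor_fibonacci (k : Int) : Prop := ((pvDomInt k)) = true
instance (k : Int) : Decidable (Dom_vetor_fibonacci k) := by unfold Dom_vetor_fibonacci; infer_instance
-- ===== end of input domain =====

-- B merges A's build-then-filter into one pass with two rolling integers (simpler: O(1) extra state).

-- ===== PORT A =====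
-- while len(sequencia) < k: append sequencia[-2 index]+sequencia[-1 index]; each step grows the
-- list by one, so (k - 3).toNat steps suffice and the guard is kept literally.
-- The indices len-2 and len-1 are always in range (len ≥ 3), so pyGetD's default 0 is never used.
def vetorFibBuild (k : Int) : Nat → List Int → List Int
  | 0, s => s
  | n + 1, s =>
      if (s.length : Int) < k then
        vetorFibBuild k n
          (s ++ [PySem.List.pyGetD s ((s.length : Int) - 2) 0 +
                 PySem.List.pyGetD s ((s.length : Int) - 1) 0])
      else s

def vetor_fibonacci (k : Int) : Option (List Int) :=
  if k < 3 then
    none  -- Python returns False here (not a list); excluded by Pre_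
  else
    let sequencia := vetorFibBuild k (k - 3).toNat [1, 2, 3]
    let X :=
      (PySem.List.pyRange 3 (PySem.List.len sequencia)).foldl
        (fun X i =>
          if PySem.Int.mod (PySem.List.pyGetD sequencia i 0) 3 == 0 then
            X ++ [PySem.List.pyGetD sequencia i 0]
          else X)
        [3]
    some X

-- ===== PORT B =====
def vetorFibLoop : Nat → Int → Int → List Int → List Int
  | 0, _, _, X => X
  | n + 1, prev2, prev1, X =>
      let nxt := prev2 + prev1
      vetorFibLoop n prev1 nxt (if PySem.Int.mod nxt 3 == 0 then X ++ [nxt] else X)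

def vetor_fibonacci_alt (k : Int) : Option (List Int) :=
  if k < 3 then none else some (vetorFibLoop (k - 3).toNat 2 3 [3])

-- ===== PRECONDITION & SPEC =====
-- Pre_ excludes k < 3, where Python A returns False — a bool, not a value of the declared
-- list type.
def Pre_vetor_fibonacci (k : Int) : Prop := 3 ≤ k
instance (k : Int) : Decidable (Pre_vetor_fibonacci k) := by unfold Pre_vetor_fibonacci; infer_instance
def pvWitness_vetor_fibonacci : Int := (7)

def Spec_vetor_fibonacci (k : Int) (out : Option (List Int)) : Prop := out = vetor_fibonacci_alt k
instance (k : Int) (out : Option (List Int)) : Decidable (Spec_vetor_fibonacci k out) := by unfold Spec_vetor_fibonacci; infer_instance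

-- ===== CLAIM (what is proved, stated in full; the proofs are below) =====
def Claim_equal_vetor_fibonacci : Prop := ∀ (k : Int), Dom_vetor_fibonacci k → Pre_vetor_fibonacci k → Spec_vetor_fibonacci k (vetor_fibonacci k)

-- ===== LEMMAS AND PROOFS =====

-- the abstract tail of the sequence generated after seeds a, b
def vetorFibGen : Int → Int → Nat → List Int
  | _, _, 0 => []
  | a, b, n + 1 => (a + b) :: vetorFibGen b (a + b) n

theorem vetorFibLoop_eq (n : Nat) : ∀ (a b : Int) (X : List Int),
    vetorFibLoop n a b X =
      X ++ (vetorFibGen a b n).filter (fun x => PySem.Int.mod x 3 == 0) := by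
  induction n with
  | zero => intro a b X; simp [vetorFibLoop, vetorFibGen]
  | succ n ih =>
    intro a b X
    simp only [vetorFibLoop, vetorFibGen, List.filter_cons, ih]
    by_cases h : (PySem.Int.mod (a + b) 3 == 0) = true
    · simp only [if_pos h]; simp
    · simp only [if_neg h]

theorem vetorFibBuild_eq (k : Int) (n : Nat) : ∀ (t : List Int) (a b : Int),
    ((t.length : Int) + 2 + n = k) →
    vetorFibBuild k n (t ++ [a, b]) = (t ++ [a, b]) ++ vetorFibGen a b n := by
  induction n with
  | zero => intro t a b h; simp [vetorFibBuild, vetorFibGen]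
  | succ n ih =>
    intro t a b h
    have hlt : (((t ++ [a, b]).length : Int)) < k := by
      simp only [List.length_append, List.length_cons, List.length_nil]
      push_cast; omega
    have h2 : ((t ++ [a, b]).length : Int) - 2 = (t.length : Int) := by
      simp only [List.length_append, List.length_cons, List.length_nil]; push_cast; omega
    have h1 : ((t ++ [a, b]).length : Int) - 1 = (t.length : Int) + 1 := by
      simp only [List.length_append, List.length_cons, List.length_nil]; push_cast; omega
    have ga : PySem.List.pyGetD (t ++ [a, b]) ((t.length : Int)) 0 = a := by
      have := PySem.List.pyGet?_append_length t [b] a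
      simp [PySem.List.pyGetD]
    have gb : PySem.List.pyGetD (t ++ [a, b]) ((t.length : Int) + 1) 0 = b := by
      have h3 : ((t ++ [a]).length : Int) = (t.length : Int) + 1 := by simp
      have h4 := PySem.List.pyGet?_append_length (t ++ [a]) [] b
      rw [h3] at h4
      simp only [List.append_assoc, List.cons_append, List.nil_append] at h4
      simp [PySem.List.pyGetD, h4]
    have hre : (t ++ [a, b]) ++ [a + b] = (t ++ [a]) ++ [b, a + b] := by
      simp
    simp only [vetorFibBuild, if_pos hlt, h2, h1, ga, gb, hre]
    rw [ih (t ++ [a]) b (a + b)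
        (by simp only [List.length_append, List.length_cons, List.length_nil]
            push_cast at h ⊢; omega)]
    simp [vetorFibGen]

-- ===== VERDICT (by name: the statement is the Claim_ definition above) =====
theorem vetor_fibonacci_spec : Claim_equal_vetor_fibonacci := by
  intro k _ hk
  unfold Spec_vetor_fibonacci
  have h3 : 3 ≤ k := hk
  have hk' : ¬ k < 3 := by omega
  unfold vetor_fibonacci vetor_fibonacci_alt
  simp only [if_neg hk']
  have hb := vetorFibBuild_eq k (k - 3).toNat [1] 2 3 (by simp; omega)
  simp only [List.cons_append, List.nil_append] at hb
  rw [hb]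
  rw [PySem.List.foldl_pyRange_pyGetD _ 0
      (fun X x => if PySem.Int.mod x 3 == 0 then X ++ [x] else X) [3] (by norm_num)]
  rw [vetorFibLoop_eq]
  have hdrop : List.drop (3 : Int).toNat (1 :: 2 :: 3 :: vetorFibGen 2 3 (k - 3).toNat)
      = vetorFibGen 2 3 (k - 3).toNat := by
    simp
  rw [hdrop]
  rw [PySem.List.foldl_append_if (fun y => PySem.Int.mod y 3 == 0) (fun y => y)]
  simp
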